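-- pv_equiv track=rewrite | github.com/codebyzeb/g2p-plus | src/utils.py | convert_bnc_to_ipa
-- ===== SOURCE A (Python) =====
-- CONVERSION_TABLE = {'P' : 'p',
--                 'B' : 'b',
--                 'T' : 't',
--                 'D' : 'd',
--                 'CH' : 't̠ʃ',
--                 'JH' : 'd̠ʒ',
--                 'K' : 'k',
--                 'G' : 'g',
--                 'M' : 'm',
--                 'N' : 'n',
--                 'NG' : 'ŋ',
--                 'F' : 'f',
--                 'V' : 'v',
--                 'TH' : 'θ',
--                 'DH' : 'ð',
--                 'S' : 's',
--                 'SH' : 'ʃ',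
--                 'ZH' : 'ʒ',
--                 'HH' : 'h',
--                 'R' : 'r',
--                 'L' : 'l',
--                 'W' : 'w',
--                 'Y' : 'j',
--                 'Z' : 'z',
--                 'IH' : 'ɪ',
--                 'EH' : 'ɛ',
--                 'AE' : 'a',
--                 'AH0' : 'ə',
--                 'AH1' : 'ʌ',
--                 'AH2' : 'ʌ',
--                 'UH1' : 'ʊ',
--                 'UH2' : 'ʊ',
--                 'OH': 'ɒ',
--                 'UH' : 'ʊ',
--                 'IY' : 'i:',
--                 'EY' : 'eɪ',
--                 'AY' : 'aɪ',
--                 'OY' : 'oɪ',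
--                 'AW' : 'aʊ',
--                 'OW' : 'əʊ',
--                 'UW' : 'u:',
--                 'ER0': 'ɚ',
--                 'ER1': 'ə:',
--                 'ER2': 'ə',
--                 'AA' : 'ɑ:',
--                 'AO' : 'ɔ:',}
--
-- def convert_bnc_to_ipa(phones):
--     """Converts a list of phones to IPA."""
--     ipa = []
--     i = 0
--     while i < len(phones):
--         # Deal with dipthongs
--         phone = phones[i].upper()
--         if i != len(phones) - 1 and (phone == 'IH1' or phone == 'IH2') and phones[i+1] == 'AH0':
--             ipa.append('ɪə')
--             i += 1
--         elif phone in CONVERSION_TABLE: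
--             ipa.append(CONVERSION_TABLE[phone])
--         elif phone[-1] in ['0','1','2'] and phone[:-1] in CONVERSION_TABLE: # Stressed vowel
--             ipa.append(CONVERSION_TABLE[phone[:-1]])
--         else:
--             raise ValueError('Unknown phone: {}'.format(phone))
--         i += 1
--     return ipa
-- ===== SOURCE B (Python) =====
-- CONVERSION_TABLE = {'P' : 'p',
--                 'B' : 'b',
--                 'T' : 't',
--                 'D' : 'd',
--                 'CH' : 't̠ʃ',
--                 'JH' : 'd̠ʒ',
--                 'K' : 'k',
--                 'G' : 'g',
--                 'M' : 'm',
--                 'N' : 'n',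
--                 'NG' : 'ŋ',
--                 'F' : 'f',
--                 'V' : 'v',
--                 'TH' : 'θ',
--                 'DH' : 'ð',
--                 'S' : 's',
--                 'SH' : 'ʃ',
--                 'ZH' : 'ʒ',
--                 'HH' : 'h',
--                 'R' : 'r',
--                 'L' : 'l',
--                 'W' : 'w',
--                 'Y' : 'j',
--                 'Z' : 'z',
--                 'IH' : 'ɪ',
--                 'EH' : 'ɛ',
--                 'AE' : 'a',
--                 'AH0' : 'ə',
--                 'AH1' : 'ʌ',
--                 'AH2' : 'ʌ',
--                 'UH1' : 'ʊ',
--                 'UH2' : 'ʊ',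
--                 'OH': 'ɒ',
--                 'UH' : 'ʊ',
--                 'IY' : 'i:',
--                 'EY' : 'eɪ',
--                 'AY' : 'aɪ',
--                 'OY' : 'oɪ',
--                 'AW' : 'aʊ',
--                 'OW' : 'əʊ',
--                 'UW' : 'u:',
--                 'ER0': 'ɚ',
--                 'ER1': 'ə:',
--                 'ER2': 'ə',
--                 'AA' : 'ɑ:',
--                 'AO' : 'ɔ:',}
--
--
-- def _token_to_ipa(token):
--     """Maps one merged token to IPA; None is the diphthong sentinel."""
--     if token is None:
--         return 'ɪə'
--     phone = token.upper()
--     if phone in CONVERSION_TABLE: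
--         return CONVERSION_TABLE[phone]
--     if phone[-1] in ['0', '1', '2'] and phone[:-1] in CONVERSION_TABLE:
--         return CONVERSION_TABLE[phone[:-1]]
--     raise ValueError('Unknown phone: {}'.format(phone))
--
--
-- def convert_bnc_to_ipa(phones):
--     """Converts a list of phones to IPA."""
--     # Pass 1: collapse IH1/IH2 followed by literal 'AH0' into a sentinel token.
--     tokens = []
--     i = 0
--     n = len(phones)
--     while i < n:
--         if i + 1 < n and phones[i].upper() in ('IH1', 'IH2') and phones[i + 1] == 'AH0':
--             tokens.append(None)
--             i += 2
--         else:
--             tokens.append(phones[i])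
--             i += 1
--     # Pass 2: map every token to its IPA symbol.
--     return [_token_to_ipa(t) for t in tokens]
-- ===== Notes on version B (the rewrite author's own statement) =====
-- stated objective: alternative
-- what changed: A's single interleaved while-loop (lookahead merge and table mapping in one pass) is split into two independent passes: a lookahead pass that collapses each IH1/IH2 followed by literal 'AH0' into a sentinel token, then a separate token-to-IPA mapping pass over the token list.
import Mathlib
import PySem

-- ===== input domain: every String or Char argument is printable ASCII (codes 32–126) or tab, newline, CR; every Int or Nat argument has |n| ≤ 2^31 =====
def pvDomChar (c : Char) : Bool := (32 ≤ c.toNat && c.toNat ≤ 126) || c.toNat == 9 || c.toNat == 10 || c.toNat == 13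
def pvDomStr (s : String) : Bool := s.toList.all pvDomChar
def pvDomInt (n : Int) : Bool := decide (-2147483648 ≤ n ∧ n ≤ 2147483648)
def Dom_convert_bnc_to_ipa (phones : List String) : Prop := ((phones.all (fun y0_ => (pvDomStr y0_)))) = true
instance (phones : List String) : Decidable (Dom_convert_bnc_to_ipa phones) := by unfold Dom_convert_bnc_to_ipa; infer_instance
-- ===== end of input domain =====

-- B replaces A's single interleaved lookahead loop by two independent passes (merge to tokens, then map
-- tokens to IPA); objective: alternative decomposition, same cost. Equal return value on all of Pre_.

-- ===== PORT A =====
-- dict literal with 46 distinct keys; built with Dict.mk (= Dict.ofList on distinct keys) so lookups reduce cheaply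
def bncTable : PySem.Dict String String := PySem.Dict.mk
  [("P", "p"), ("B", "b"), ("T", "t"), ("D", "d"), ("CH", "t̠ʃ"), ("JH", "d̠ʒ"),
   ("K", "k"), ("G", "g"), ("M", "m"), ("N", "n"), ("NG", "ŋ"), ("F", "f"),
   ("V", "v"), ("TH", "θ"), ("DH", "ð"), ("S", "s"), ("SH", "ʃ"), ("ZH", "ʒ"),
   ("HH", "h"), ("R", "r"), ("L", "l"), ("W", "w"), ("Y", "j"), ("Z", "z"),
   ("IH", "ɪ"), ("EH", "ɛ"), ("AE", "a"), ("AH0", "ə"), ("AH1", "ʌ"), ("AH2", "ʌ"),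
   ("UH1", "ʊ"), ("UH2", "ʊ"), ("OH", "ɒ"), ("UH", "ʊ"), ("IY", "i:"), ("EY", "eɪ"),
   ("AY", "aɪ"), ("OY", "oɪ"), ("AW", "aʊ"), ("OW", "əʊ"), ("UW", "u:"), ("ER0", "ɚ"),
   ("ER1", "ə:"), ("ER2", "ə"), ("AA", "ɑ:"), ("AO", "ɔ:")]

-- A's elif/elif/else chain on the (already uppercased) phone; the two 'raise ValueError' paths and the
-- IndexError of phone[-1] on an empty phone return "" here — all of them are excluded by Pre_.
def mapPhoneA (phone : String) : String :=
  match bncTable.get? phone with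
  | some v => v
  | none =>
    match PySem.Str.pyGet? phone (-1) with
    | none => ""            -- Python: IndexError (phone[-1] on ''), outside Pre_
    | some c =>
      if (c = '0' ∨ c = '1' ∨ c = '2') then
        match bncTable.get? (PySem.Str.slice phone none (some (-1))) with
        | some v => v
        | none => ""        -- Python: raise ValueError, outside Pre_
      else ""               -- Python: raise ValueError, outside Pre_

-- A's while loop over i with lookahead phones[i+1]; 'i != len-1' is 'rest nonempty'.
def convert_bnc_to_ipa (phones : List String) : List String :=
  match phones with
  | [] => []
  | [p] => [mapPhoneA (PySem.Str.upper p)]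
  | p :: q :: rest =>
    let phone := PySem.Str.upper p
    if (phone = "IH1" ∨ phone = "IH2") ∧ q = "AH0" then
      "ɪə" :: convert_bnc_to_ipa rest
    else
      mapPhoneA phone :: convert_bnc_to_ipa (q :: rest)

-- ===== PORT B =====
-- Pass 1: collapse IH1/IH2 followed by literal "AH0" into the sentinel token 'none'.
def mergeTokens (phones : List String) : List (Option String) :=
  match phones with
  | [] => []
  | [p] => [some p]
  | p :: q :: rest =>
    if (PySem.Str.upper p = "IH1" ∨ PySem.Str.upper p = "IH2") ∧ q = "AH0" then
      none :: mergeTokens rest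
    else
      some p :: mergeTokens (q :: rest)

-- Pass 2: one token to IPA (the raise paths return "", outside Pre_).
def tokenToIpa (token : Option String) : String :=
  match token with
  | none => "ɪə"
  | some t =>
    let phone := PySem.Str.upper t
    match bncTable.get? phone with
    | some v => v
    | none =>
      match PySem.Str.pyGet? phone (-1) with
      | none => ""          -- Python: IndexError, outside Pre_
      | some c =>
        if (c = '0' ∨ c = '1' ∨ c = '2') then
          match bncTable.get? (PySem.Str.slice phone none (some (-1))) with
          | some v => v
          | none => ""      -- Python: raise ValueError, outside Pre_
        else ""             -- Python: raise ValueError, outside Pre_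

def convert_bnc_to_ipa_alt (phones : List String) : List String :=
  (mergeTokens phones).map tokenToIpa

-- ===== PRECONDITION & SPEC =====
-- A raises (ValueError on an unknown phone, IndexError on an empty phone) exactly when some phone is not
-- in the table, directly or after stripping a trailing stress digit; Pre_ admits exactly the inputs on
-- which the Python returns.
def validPhone (p : String) : Bool :=
  let u := PySem.Str.upper p
  (bncTable.get? u).isSome ||
  (match PySem.Str.pyGet? u (-1) with
   | some c => (c = '0' || c = '1' || c = '2') &&
               (bncTable.get? (PySem.Str.slice u none (some (-1)))).isSome
   | none => false)

def Pre_convert_bnc_to_ipa (phones : List String) : Prop := phones.all validPhone = true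
instance (phones : List String) : Decidable (Pre_convert_bnc_to_ipa phones) := by
  unfold Pre_convert_bnc_to_ipa; infer_instance

def pvWitness_convert_bnc_to_ipa : List String := ["K", "ih1", "AH0", "t", "AE1", "D"]

def Spec_convert_bnc_to_ipa (phones : List String) (out : List String) : Prop := out = convert_bnc_to_ipa_alt phones
instance (phones : List String) (out : List String) : Decidable (Spec_convert_bnc_to_ipa phones out) := by unfold Spec_convert_bnc_to_ipa; infer_instance

-- ===== CLAIM (what is proved, stated in full; the proofs are below) =====
def Claim_equal_convert_bnc_to_ipa : Prop := ∀ (phones : List String), Dom_convert_bnc_to_ipa phones → Pre_convert_bnc_to_ipa phones → Spec_convert_bnc_to_ipa phones (convert_bnc_to_ipa phones)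

-- ===== LEMMAS AND PROOFS =====

theorem tokenToIpa_none : tokenToIpa none = "ɪə" := rfl

-- The per-token mapping of B coincides with A's mapping of the uppercased phone.
theorem tokenToIpa_some (p : String) : tokenToIpa (some p) = mapPhoneA (PySem.Str.upper p) := rfl

-- The two programs agree on every input (the raise paths of both ports return "" at the same places).
theorem convert_eq_alt (phones : List String) :
    convert_bnc_to_ipa phones = convert_bnc_to_ipa_alt phones := by
  unfold convert_bnc_to_ipa_alt
  induction phones using mergeTokens.induct with
  | case1 => simp only [convert_bnc_to_ipa, mergeTokens, List.map_nil]
  | case2 p => simp only [convert_bnc_to_ipa, mergeTokens, List.map_cons, List.map_nil, tokenToIpa_some]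
  | case3 p q rest h ih =>
    simp only [convert_bnc_to_ipa, mergeTokens, if_pos h, List.map_cons, tokenToIpa_none]
    exact congrArg _ ih
  | case4 p q rest h ih =>
    simp only [convert_bnc_to_ipa, mergeTokens, if_neg h, List.map_cons, tokenToIpa_some]
    exact congrArg _ ih

-- ===== VERDICT (by name: the statement is the Claim_ definition above) =====
theorem convert_bnc_to_ipa_spec : Claim_equal_convert_bnc_to_ipa := by
  intro phones _ _
  unfold Spec_convert_bnc_to_ipa
  exact convert_eq_alt phones
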